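-- pv_equiv track=rewrite | github.com/sparsh-kamat/aiLab | nqueens.py | min_conflict_row
-- ===== SOURCE A (Python) =====
-- def conflicts(state, row, col):
--     # count the number of conflicts
--     count = 0
--     for i in range(len(state)):
--         if i != row:  # makes sure we are not checking conflicts in the same row
--             if state[i] == col or abs(i - row) == abs(state[i] - col):  # horiz, vert, diag
--                 count += 1
--     return count
--
-- def heuristic(state):
--     # number of conflicts in the current state
--     total_conflicts = 0
--     for i in range(len(state)):
--         total_conflicts += conflicts(state, i, state[i])
--     return total_conflicts
--
-- def min_conflict_row(state):
--     min_conflicts = float("inf")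
--     min_row = -1
--     for i in range(8):
--         for j in range(8):
--             if j != state[i]:
--                 state_copy = state[:]
--                 state_copy[i] = j
--                 conflicts_count = heuristic(state_copy)
--                 if conflicts_count < min_conflicts:
--                     min_conflicts = conflicts_count
--                     min_row = i
--     return min_row
-- ===== SOURCE B (Python) =====
-- def conflicts(state, row, col):
--     # count the number of conflicts
--     count = 0
--     for i in range(len(state)):
--         if i != row:  # makes sure we are not checking conflicts in the same row
--             if state[i] == col or abs(i - row) == abs(state[i] - col):  # horiz, vert, diag
--                 count += 1
--     return count
--
-- def heuristic(state):
--     # number of conflicts in the current state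
--     total_conflicts = 0
--     for i in range(len(state)):
--         total_conflicts += conflicts(state, i, state[i])
--     return total_conflicts
--
-- def min_conflict_row(state):
--     # Two staged passes instead of one accumulator fold over 64 board copies:
--     # for each row compute its best achievable heuristic incrementally
--     # (base - 2*conflicts(old col) + 2*conflicts(new col); moving queen i only
--     # changes the double-counted pairs involving queen i), then return the
--     # first row attaining the overall minimum.  No board copy, no full rescan.
--     base = heuristic(state)
--     vals = []
--     for i in range(8):
--         old = conflicts(state, i, state[i])
--         vals.append(min(base - 2 * old + 2 * conflicts(state, i, j)
--                         for j in range(8) if j != state[i]))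
--     return vals.index(min(vals))
-- ===== Notes on version B (the rewrite author's own statement) =====
-- stated objective: faster
-- what changed: B replaces A's single accumulator fold over 64 cloned boards with full heuristic recomputation by two staged passes: it computes each row's best achievable heuristic incrementally (base - 2*conflicts(old col) + 2*conflicts(new col), since moving queen i only changes the double-counted pairs involving queen i), collects these 8 values in a list, and returns the first index of the list's minimum via min/index.
import Mathlib
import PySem

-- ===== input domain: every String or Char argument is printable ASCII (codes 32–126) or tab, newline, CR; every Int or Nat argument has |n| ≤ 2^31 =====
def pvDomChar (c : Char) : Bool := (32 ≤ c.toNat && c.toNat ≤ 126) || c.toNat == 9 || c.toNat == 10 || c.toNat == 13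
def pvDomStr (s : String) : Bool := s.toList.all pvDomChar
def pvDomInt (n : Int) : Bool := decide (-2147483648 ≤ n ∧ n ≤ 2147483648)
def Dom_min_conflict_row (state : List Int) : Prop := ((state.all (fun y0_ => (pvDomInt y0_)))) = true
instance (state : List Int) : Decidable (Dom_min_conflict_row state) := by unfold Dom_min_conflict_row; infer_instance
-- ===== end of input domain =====

-- B replaces A's 64-board-copy accumulator search by two staged passes: per row the
-- best achievable heuristic is computed incrementally (base - 2*old + 2*new conflicts),
-- collected in a list, and the answer is the first index of that list's minimum.

-- ===== PORT A =====
-- shared helper `conflicts` (identical in Source A and Source B); indices i of the loop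
-- are always in range, so `getD i 0` is exact for `state[i]`.
def pyConflicts (state : List Int) (row col : Int) : Int :=
  (List.range state.length).foldl (fun count (i : ℕ) =>
    if (i : Int) ≠ row then
      if state.getD i 0 = col ∨ |(i : Int) - row| = |state.getD i 0 - col| then count + 1
      else count
    else count) 0

-- shared helper `heuristic` (identical in Source A and Source B)
def pyHeuristic (state : List Int) : Int :=
  (List.range state.length).foldl (fun t (i : ℕ) => t + pyConflicts state (i : Int) (state.getD i 0)) 0

-- `cnt < min_conflicts` where min_conflicts starts as float("inf"): none plays inf
def pyLtInf (c : Int) : Option Int → Bool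
  | none => true
  | some v => c < v

def min_conflict_row (state : List Int) : Int :=
  ((List.range 8).foldl (fun (acc : Option Int × Int) (i : ℕ) =>
    (List.range 8).foldl (fun (acc : Option Int × Int) (j : ℕ) =>
      if (j : Int) ≠ state.getD i 0 then
        let state_copy := state.set i (j : Int)
        let conflicts_count := pyHeuristic state_copy
        if pyLtInf conflicts_count acc.1 then (some conflicts_count, (i : Int)) else acc
      else acc) acc) ((none, -1) : Option Int × Int)).2

-- ===== PORT B =====
-- `min(...)` runs over a NONEMPTY generator (range(8) minus at most one column) and
-- vals has 8 entries, so each PySem min?/index? is `some` here and `.getD 0` is dead.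
def min_conflict_row_alt (state : List Int) : Int :=
  let base := pyHeuristic state
  let vals := (List.range 8).map (fun (i : ℕ) =>
    let old := pyConflicts state (i : Int) (state.getD i 0)
    (PySem.List.min? (((List.range 8).filter (fun (j : ℕ) => (j : Int) != state.getD i 0)).map
        (fun (j : ℕ) => base - 2 * old + 2 * pyConflicts state (i : Int) (j : Int)))
      (fun x => x)).getD 0)
  (((PySem.List.index? vals ((PySem.List.min? vals (fun x => x)).getD 0)).getD 0 : ℕ) : Int)

-- ===== PRECONDITION & SPEC =====
-- A indexes state[i] for i in range(8): lists shorter than 8 raise IndexError.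
def Pre_min_conflict_row (state : List Int) : Prop := 8 ≤ state.length
instance (state : List Int) : Decidable (Pre_min_conflict_row state) := by unfold Pre_min_conflict_row; infer_instance
def pvWitness_min_conflict_row : List Int := [0, 1, 2, 3, 4, 5, 6, 7]

def Spec_min_conflict_row (state : List Int) (out : Int) : Prop := out = min_conflict_row_alt state
instance (state : List Int) (out : Int) : Decidable (Spec_min_conflict_row state out) := by unfold Spec_min_conflict_row; infer_instance

-- ===== CLAIM (what is proved, stated in full; the proofs are below) =====
def Claim_equal_min_conflict_row : Prop := ∀ (state : List Int), Dom_min_conflict_row state → Pre_min_conflict_row state → Spec_min_conflict_row state (min_conflict_row state)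

-- ===== LEMMAS AND PROOFS =====

-- the 0/1 weight of one (queen i, queen at `row` placed in column `col`) check
def phi (a b : Int) (x y : Int) : Int :=
  if a ≠ b ∧ (x = y ∨ |a - b| = |x - y|) then 1 else 0

lemma phi_symm (a b x y : Int) : phi a b x y = phi b a y x := by
  unfold phi
  have h1 : (a ≠ b ∧ (x = y ∨ |a - b| = |x - y|)) ↔ (b ≠ a ∧ (y = x ∨ |b - a| = |y - x|)) := by
    rw [abs_sub_comm a b, abs_sub_comm x y, ne_comm, eq_comm]
  rw [if_congr h1 rfl rfl]

lemma phi_self (a x y : Int) : phi a a x y = 0 := by simp [phi]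

lemma foldl_add_sum (g : ℕ → Int) (n : ℕ) :
    (List.range n).foldl (fun t (i : ℕ) => t + g i) 0 = ∑ i ∈ Finset.range n, g i := by
  induction n with
  | zero => simp
  | succ n ih => simp [List.range_succ, Finset.sum_range_succ, ih]

lemma conflicts_eq_sum (state : List Int) (row col : Int) :
    pyConflicts state row col =
      ∑ i ∈ Finset.range state.length, phi (i : Int) row (state.getD i 0) col := by
  unfold pyConflicts
  rw [← foldl_add_sum (fun i => phi (i : Int) row (state.getD i 0) col)]
  congr 1
  funext t i
  simp only [phi]
  split_ifs <;> omega

lemma heuristic_eq_sum (state : List Int) :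
    pyHeuristic state =
      ∑ r ∈ Finset.range state.length, pyConflicts state (r : Int) (state.getD r 0) := by
  unfold pyHeuristic
  exact foldl_add_sum _ _

lemma getD_set_self (state : List Int) (p : ℕ) (j : Int) (hp : p < state.length) :
    (state.set p j).getD p 0 = j := by
  simp [List.getD, hp]

lemma getD_set_ne (state : List Int) (p i : ℕ) (j : Int) (h : i ≠ p) :
    (state.set p j).getD i 0 = state.getD i 0 := by
  simp [List.getD, List.getElem?_set_ne (Ne.symm h)]

-- the incremental-update identity on abstract double sums
lemma key_sum (n p : ℕ) (j : Int) (v : ℕ → Int) (hp : p < n) :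
    ∑ r ∈ Finset.range n, ∑ i ∈ Finset.range n,
        phi (i : Int) (r : Int) (if i = p then j else v i) (if r = p then j else v r)
      = ∑ r ∈ Finset.range n, ∑ i ∈ Finset.range n, phi (i : Int) (r : Int) (v i) (v r)
        - 2 * ∑ i ∈ Finset.range n, phi (i : Int) (p : Int) (v i) (v p)
        + 2 * ∑ i ∈ Finset.range n, phi (i : Int) (p : Int) (v i) j := by
  have hmem : p ∈ Finset.range n := Finset.mem_range.mpr hp
  have h1 : ∑ i ∈ Finset.range n,
      phi (i : Int) (p : Int) (if i = p then j else v i) (if p = p then j else v p)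
      = ∑ i ∈ Finset.range n, phi (i : Int) (p : Int) (v i) j := by
    rw [if_pos rfl]
    apply Finset.sum_congr rfl
    intro i _
    by_cases h : i = p
    · subst h; rw [if_pos rfl, phi_self, phi_self]
    · rw [if_neg h]
  have hsym : ∀ x : Int, ∀ (s : Finset ℕ),
      ∑ r ∈ s, phi (p : Int) (r : Int) x (v r) = ∑ r ∈ s, phi (r : Int) (p : Int) (v r) x := by
    intro x s; exact Finset.sum_congr rfl (fun r _ => phi_symm _ _ _ _)
  have herase : ∀ x : Int, ∑ r ∈ (Finset.range n).erase p, phi (p : Int) (r : Int) x (v r)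
      = ∑ i ∈ Finset.range n, phi (i : Int) (p : Int) (v i) x := by
    intro x
    have hadd : phi (p : Int) (p : Int) x (v p)
        + ∑ r ∈ (Finset.range n).erase p, phi (p : Int) (r : Int) x (v r)
        = ∑ r ∈ Finset.range n, phi (p : Int) (r : Int) x (v r) :=
      Finset.add_sum_erase (Finset.range n) (fun r => phi (p : Int) (r : Int) x (v r)) hmem
    rw [phi_self] at hadd
    rw [← hsym x (Finset.range n)]
    linarith [hadd]
  have h2 : ∀ r ∈ (Finset.range n).erase p,
      ∑ i ∈ Finset.range n, phi (i : Int) (r : Int) (if i = p then j else v i)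
          (if r = p then j else v r)
        = (∑ i ∈ Finset.range n, phi (i : Int) (r : Int) (v i) (v r))
          - phi (p : Int) (r : Int) (v p) (v r) + phi (p : Int) (r : Int) j (v r) := by
    intro r hr
    have hrp : r ≠ p := (Finset.mem_erase.mp hr).1
    rw [if_neg hrp]
    have e1 : ∑ i ∈ Finset.range n, phi (i : Int) (r : Int) (if i = p then j else v i) (v r)
        = phi (p : Int) (r : Int) j (v r)
          + ∑ i ∈ (Finset.range n).erase p, phi (i : Int) (r : Int) (v i) (v r) := by
      rw [← Finset.add_sum_erase (Finset.range n)
        (fun i => phi (i : Int) (r : Int) (if i = p then j else v i) (v r)) hmem]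
      rw [if_pos rfl]
      congr 1
      exact Finset.sum_congr rfl (fun i hi => by rw [if_neg (Finset.mem_erase.mp hi).1])
    have e2 : ∑ i ∈ Finset.range n, phi (i : Int) (r : Int) (v i) (v r)
        = phi (p : Int) (r : Int) (v p) (v r)
          + ∑ i ∈ (Finset.range n).erase p, phi (i : Int) (r : Int) (v i) (v r) :=
      (Finset.add_sum_erase _ _ hmem).symm
    rw [e1, e2]; ring
  rw [← Finset.add_sum_erase (Finset.range n) _ hmem, h1, Finset.sum_congr rfl h2]
  have houter : ∑ r ∈ (Finset.range n).erase p,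
      ∑ i ∈ Finset.range n, phi (i : Int) (r : Int) (v i) (v r)
      = (∑ r ∈ Finset.range n, ∑ i ∈ Finset.range n, phi (i : Int) (r : Int) (v i) (v r))
        - ∑ i ∈ Finset.range n, phi (i : Int) (p : Int) (v i) (v p) := by
    have hadd : (∑ i ∈ Finset.range n, phi (i : Int) (p : Int) (v i) (v p))
        + ∑ r ∈ (Finset.range n).erase p, ∑ i ∈ Finset.range n, phi (i : Int) (r : Int) (v i) (v r)
        = ∑ r ∈ Finset.range n, ∑ i ∈ Finset.range n, phi (i : Int) (r : Int) (v i) (v r) :=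
      Finset.add_sum_erase (Finset.range n)
        (fun r => ∑ i ∈ Finset.range n, phi (i : Int) (r : Int) (v i) (v r)) hmem
    linarith [hadd]
  rw [Finset.sum_add_distrib, Finset.sum_sub_distrib, houter, herase, herase]
  ring

-- key incremental-update identity: moving queen p to column j changes the
-- heuristic by twice the change in queen p's own conflict count
lemma heuristic_set (state : List Int) (p : ℕ) (j : Int) (hp : p < state.length) :
    pyHeuristic (state.set p j) =
      pyHeuristic state - 2 * pyConflicts state (p : Int) (state.getD p 0)
        + 2 * pyConflicts state (p : Int) j := by
  have hv : ∀ i, (state.set p j).getD i 0 = if i = p then j else state.getD i 0 := by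
    intro i
    by_cases h : i = p
    · subst h; rw [if_pos rfl]; exact getD_set_self _ _ _ hp
    · rw [if_neg h]; exact getD_set_ne _ _ _ _ h
  rw [heuristic_eq_sum, heuristic_eq_sum]
  simp only [conflicts_eq_sum, List.length_set, hv]
  exact key_sum state.length p j (fun i => state.getD i 0) hp

-- proof-side names for B's intermediate values
def innerList (state : List Int) (i : ℕ) : List Int :=
  ((List.range 8).filter (fun (j : ℕ) => (j : Int) != state.getD i 0)).map
    (fun (j : ℕ) => pyHeuristic state - 2 * pyConflicts state (i : Int) (state.getD i 0)
      + 2 * pyConflicts state (i : Int) (j : Int))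

-- B's per-row best value
def rowBest (state : List Int) (i : ℕ) : Int :=
  (PySem.List.min? (innerList state i) (fun y => y)).getD 0

lemma innerList_ne_nil (state : List Int) (i : ℕ) : innerList state i ≠ [] := by
  unfold innerList
  intro h
  rw [List.map_eq_nil_iff, List.filter_eq_nil_iff] at h
  have h0 := h 0 (by decide)
  have h1 := h 1 (by decide)
  simp at h0 h1
  omega

lemma pyLtInf_none (c : Int) : pyLtInf c none = true := rfl
lemma pyLtInf_some (c v : Int) : pyLtInf c (some v) = decide (c < v) := rfl

lemma foldl_min_of_min? (t : List Int) (mt a : Int)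
    (h : PySem.List.min? t (fun y => y) = some mt) : t.foldl min a = min a mt := by
  cases t with
  | nil => simp [PySem.List.min?] at h
  | cons y t' =>
    rw [PySem.List.min?_id_cons] at h
    have : mt = t'.foldl min y := by injection h; omega
    subst this
    rw [show List.foldl min a (y :: t') = List.foldl min (min a y) t' from rfl]
    exact List.foldl_assoc

-- A's running-min-with-strict-< loop, characterised by the list minimum and the
-- first element attaining it
lemma foldl_min_upd (g : ℕ → Int) (r : ℕ → Int) :
    ∀ (l : List ℕ) (m : Int) (k : ℕ) (acc : Option Int × Int),
    PySem.List.min? (l.map g) (fun y => y) = some m →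
    l.find? (fun j => g j == m) = some k →
    l.foldl (fun a j => if pyLtInf (g j) a.1 then (some (g j), r j) else a) acc
      = if pyLtInf m acc.1 then (some m, r k) else acc := by
  intro l
  induction l with
  | nil => intro m k acc hm _; simp [PySem.List.min?] at hm
  | cons x t ih =>
    intro m k acc hm hf
    rcases ht : PySem.List.min? (t.map g) (fun y => y) with _ | mtv
    · -- t is empty
      have htnil : t = [] := by
        have := (PySem.List.min?_eq_none_iff _ _).mp ht
        simpa using this
      subst htnil
      rw [List.map_cons, PySem.List.min?_id_cons] at hm
      have hmx : m = g x := by simpa using hm.symm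
      subst hmx
      rw [List.find?_cons_of_pos (by simp)] at hf
      have hk : k = x := by simpa using hf.symm
      rw [hk]
      rfl
    · -- t nonempty with minimum mtv; m = min (g x) mtv
      have hmval : m = min (g x) mtv := by
        rw [List.map_cons, PySem.List.min?_id_cons, foldl_min_of_min? _ _ _ ht] at hm
        simpa using hm.symm
      -- a first element of t attaining mtv
      have hmem : mtv ∈ t.map g := PySem.List.min?_mem ht
      obtain ⟨j0, hj0, hgj0⟩ := List.mem_map.mp hmem
      have hsome : (t.find? (fun j => g j == mtv)).isSome :=
        List.find?_isSome.mpr ⟨j0, hj0, by simpa [List.getD] using hgj0⟩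
      obtain ⟨kt, hkt⟩ := Option.isSome_iff_exists.mp hsome
      by_cases hx : g x ≤ mtv
      · -- head wins (ties included): m = g x, k = x
        have hmx : m = g x := by omega
        subst hmx
        rw [List.find?_cons_of_pos (by simp)] at hf
        have hk : k = x := by simpa using hf.symm
        rw [hk, List.foldl_cons, ih mtv kt _ ht hkt]
        by_cases h1 : pyLtInf (g x) acc.1 = true
        · have h2 : pyLtInf mtv ((some (g x), r x) : Option Int × Int).1 = false := by
            rw [show ((some (g x), r x) : Option Int × Int).1 = some (g x) from rfl, pyLtInf_some]
            simp; omega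
          rw [if_pos h1, if_neg (by simp [h2])]
        · have h2 : pyLtInf mtv acc.1 = false := by
            rcases hacc : acc.1 with _ | v
            · rw [hacc, pyLtInf_none] at h1; exact absurd rfl h1
            · rw [hacc, pyLtInf_some] at h1
              rw [pyLtInf_some]
              simp at h1 ⊢; omega
          rw [if_neg h1, if_neg (by simp [h2])]
      · -- tail strictly wins: m = mtv, k comes from t
        have hmx : mtv = m := by omega
        subst hmx
        rw [List.find?_cons_of_neg (by simp; omega)] at hf
        rw [List.foldl_cons, ih mtv k _ ht hf]
        by_cases h1 : pyLtInf (g x) acc.1 = true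
        · have h2 : pyLtInf mtv ((some (g x), r x) : Option Int × Int).1 = true := by
            rw [show ((some (g x), r x) : Option Int × Int).1 = some (g x) from rfl, pyLtInf_some]
            simp; omega
          have h3 : pyLtInf mtv acc.1 = true := by
            rcases hacc : acc.1 with _ | v
            · rw [pyLtInf_none]
            · rw [hacc, pyLtInf_some] at h1
              rw [pyLtInf_some]
              simp at h1 ⊢; omega
          rw [if_pos h1, if_pos h2, if_pos h3]
        · rw [if_neg h1]

-- `list.index(min(list))` finds the position of the first element attaining the
-- minimum; over a mapped list that position is where find? fires
lemma index?_map_of_find? (g : ℕ → Int) (m : Int) :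
    ∀ (l : List ℕ) (k : ℕ), l.find? (fun i => g i == m) = some k →
    ∃ d : ℕ, PySem.List.index? (l.map g) m = some d ∧ l[d]? = some k := by
  intro l
  induction l with
  | nil => intro k hf; simp at hf
  | cons x t ih =>
    intro k hf
    by_cases hx : g x = m
    · rw [List.find?_cons_of_pos (by simp [hx])] at hf
      have hk : k = x := by simpa using hf.symm
      subst hk
      refine ⟨0, ?_, rfl⟩
      rw [List.map_cons, hx]
      exact PySem.List.index?_cons_self _ _
    · rw [List.find?_cons_of_neg (by simp [hx])] at hf
      obtain ⟨d, hd, hget⟩ := ih k hf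
      refine ⟨d + 1, ?_, by simpa using hget⟩
      rw [List.map_cons, PySem.List.index?_cons_of_ne (List.map g t) (by simp [hx]), hd]
      rfl

-- ===== VERDICT (by name: the statement is the Claim_ definition above) =====
set_option maxHeartbeats 1600000 in
set_option maxRecDepth 8192 in
theorem min_conflict_row_spec : Claim_equal_min_conflict_row := by
  intro state _ hpre
  unfold Spec_min_conflict_row
  have hMsome : ∀ i : ℕ, PySem.List.min? (innerList state i) (fun y => y) = some (rowBest state i) := by
    intro i
    rcases h : PySem.List.min? (innerList state i) (fun y => y) with _ | v
    · exact absurd ((PySem.List.min?_eq_none_iff _ _).mp h) (innerList_ne_nil state i)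
    · simp [rowBest, h]
  -- Step 1: A's search is the running-min fold over the per-row best values
  have hA : min_conflict_row state =
      ((List.range 8).foldl (fun (acc : Option Int × Int) (i : ℕ) =>
        if pyLtInf (rowBest state i) acc.1 then (some (rowBest state i), (i : Int)) else acc)
        ((none, -1) : Option Int × Int)).2 := by
    unfold min_conflict_row
    refine congrArg Prod.snd ?_
    apply List.foldl_ext
    intro acc i hi
    have hilen : i < state.length := lt_of_lt_of_le (List.mem_range.mp hi) hpre
    -- rewrite each candidate's heuristic incrementally, then fold over the admitted columns
    have hbody : (List.range 8).foldl (fun (a : Option Int × Int) (j : ℕ) =>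
        if (j : Int) ≠ state.getD i 0 then
          let state_copy := state.set i (j : Int)
          let conflicts_count := pyHeuristic state_copy
          if pyLtInf conflicts_count a.1 then (some conflicts_count, (i : Int)) else a
        else a) acc
        = ((List.range 8).filter (fun (j : ℕ) => (j : Int) != state.getD i 0)).foldl
            (fun (a : Option Int × Int) (j : ℕ) =>
              if pyLtInf (pyHeuristic state - 2 * pyConflicts state (i : Int) (state.getD i 0)
                  + 2 * pyConflicts state (i : Int) (j : Int)) a.1
              then (some (pyHeuristic state - 2 * pyConflicts state (i : Int) (state.getD i 0)
                  + 2 * pyConflicts state (i : Int) (j : Int)), (i : Int)) else a) acc := by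
      rw [List.foldl_filter]
      apply List.foldl_ext
      intro a j _
      by_cases hj : (j : Int) = state.getD i 0
      · simp [hj]
      · simp only [bne_iff_ne, ne_eq, hj, not_false_eq_true, if_pos]
        rw [heuristic_set state i (j : Int) hilen]
    have hmem := PySem.List.min?_mem (hMsome i)
    unfold innerList at hmem
    obtain ⟨j0, hj0, hgj0⟩ := List.mem_map.mp hmem
    have hsome : ((((List.range 8).filter (fun (j : ℕ) => (j : Int) != state.getD i 0))).find?
        (fun (j : ℕ) => (pyHeuristic state - 2 * pyConflicts state (i : Int) (state.getD i 0)
          + 2 * pyConflicts state (i : Int) (j : Int)) == rowBest state i)).isSome :=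
      List.find?_isSome.mpr ⟨j0, hj0, by simpa [List.getD] using hgj0⟩
    obtain ⟨k0, hk0⟩ := Option.isSome_iff_exists.mp hsome
    exact hbody.trans (foldl_min_upd
      (fun (j : ℕ) => pyHeuristic state - 2 * pyConflicts state (i : Int) (state.getD i 0)
        + 2 * pyConflicts state (i : Int) (j : Int))
      (fun _ => (i : Int))
      ((List.range 8).filter (fun (j : ℕ) => (j : Int) != state.getD i 0))
      (rowBest state i) k0 acc (hMsome i) hk0)
  -- Step 2: both programs return the first row attaining the minimum of those values
  have h8 : PySem.List.min? ((List.range 8).map (rowBest state)) (fun y => y)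
      = some ((PySem.List.min? ((List.range 8).map (rowBest state)) (fun y => y)).getD 0) := by
    rcases h : PySem.List.min? ((List.range 8).map (rowBest state)) (fun y => y) with _ | v
    · have := (PySem.List.min?_eq_none_iff _ _).mp h
      simp at this
    · rfl
  set m2 : Int := (PySem.List.min? ((List.range 8).map (rowBest state)) (fun y => y)).getD 0 with hm2
  have hmem2 : m2 ∈ (List.range 8).map (rowBest state) := PySem.List.min?_mem h8
  obtain ⟨i0, hi0, hgi0⟩ := List.mem_map.mp hmem2
  have hsome2 : ((List.range 8).find? (fun (i : ℕ) => rowBest state i == m2)).isSome :=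
    List.find?_isSome.mpr ⟨i0, hi0, by simp [hgi0]⟩
  obtain ⟨k2, hk2⟩ := Option.isSome_iff_exists.mp hsome2
  have hA2 : min_conflict_row state = (k2 : Int) := by
    rw [hA, foldl_min_upd (rowBest state) (fun (n : ℕ) => (n : Int)) (List.range 8) m2 k2
      ((none, -1) : Option Int × Int) h8 hk2]
    rfl
  have hB2 : min_conflict_row_alt state = (k2 : Int) := by
    obtain ⟨d, hd, hgetd⟩ := index?_map_of_find? (rowBest state) m2 (List.range 8) k2 hk2
    have hdk : d = k2 := by
      have hdlt : d < 8 := by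
        by_contra hc
        rw [List.getElem?_eq_none (by simpa using not_lt.mp hc)] at hgetd
        simp at hgetd
      simpa [List.getElem?_range, hdlt] using hgetd
    have hBdef : min_conflict_row_alt state
        = (((PySem.List.index? ((List.range 8).map (rowBest state))
            ((PySem.List.min? ((List.range 8).map (rowBest state)) (fun y => y)).getD 0)).getD 0 : ℕ) : Int) := rfl
    rw [hBdef, ← hm2, hd, hdk]
    rfl
  rw [hA2, hB2]
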